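-- pv_equiv track=rewrite | github.com/smao-astro/Disk2Planet | onet_disk2D/summary/guild_cma_opt.py | parse_header_line
-- ===== SOURCE A (Python) =====
-- import typing
--
-- PARAMETER_NAMES = ("alpha", "h0", "q", "r_p", "theta_p")
--
-- def modify_list(input_list, key, pnames: list = PARAMETER_NAMES):
--     """
--     The function locates the 'key' in the 'input_list', deletes it, then inserts 'key_alpha' to 'key_theta_p'
--     at the same location where 'key' was, and returns the modified list.
--
--     :param input_list: List of strings.
--     :param key: The key string to be located and deleted.
--     :param pnames: The string appendix to be inserted.
--     :return: Modified list.
--     """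
--
--     if key not in input_list:
--         return input_list  # Return the original list if the key is not found
--
--     index = input_list.index(key)  # Find the index of the key
--     del input_list[index]  # Delete the key
--
--     # Insert 'key_alpha' to 'key_theta_p' at the located index
--     for i, pname in enumerate(pnames):
--         input_list.insert(index + i, f"{key}_{pname}")
--
--     return input_list
--
-- def parse_header_line(line: str, x_names: typing.Iterable = None):
--     columns = line.split('columns="')[1].split('"')[0].split(", ")
--     # strip the leading and trailing spaces
--     columns = [col.strip() for col in columns]
--     # Dataframes do not allow duplicate column names
--     for void_key in ["void", "0"]:
--         i = 0
--         for j, col in enumerate(columns):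
--             if col == void_key:
--                 columns[j] = f"{void_key}_{i}"
--                 i += 1
--     if x_names is not None:
--         for x_name in x_names:
--             columns = modify_list(columns, x_name)
--     return columns
-- ===== SOURCE B (Python) =====
-- import typing
--
-- PARAMETER_NAMES = ("alpha", "h0", "q", "r_p", "theta_p")
--
-- def parse_header_line(line: str, x_names: typing.Iterable = None):
--     payload = line.split('columns="')[1].split('"')[0]
--     # one pass: strip and rename duplicate 'void'/'0' columns with per-key counters
--     columns = []
--     counts = {}
--     for raw in payload.split(", "):
--         col = raw.strip()
--         if col == "void" or col == "0":
--             n = counts.get(col, 0)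
--             counts[col] = n + 1
--             columns.append(f"{col}_{n}")
--         else:
--             columns.append(col)
--     if x_names is not None:
--         for key in x_names:
--             # expand the first occurrence of key (if any) by splicing
--             for i, col in enumerate(columns):
--                 if col == key:
--                     columns = (columns[:i]
--                                + [f"{key}_{p}" for p in PARAMETER_NAMES]
--                                + columns[i + 1:])
--                     break
--     return columns
-- ===== Notes on version B (the rewrite author's own statement) =====
-- stated objective: alternative
-- what changed: B replaces A's two separate in-place dedup scans and the .index/del/insert splice of modify_list by one strip-and-count pass with a counter dict plus a scan-and-slice splice for the first occurrence of each x_name.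
import Mathlib
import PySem

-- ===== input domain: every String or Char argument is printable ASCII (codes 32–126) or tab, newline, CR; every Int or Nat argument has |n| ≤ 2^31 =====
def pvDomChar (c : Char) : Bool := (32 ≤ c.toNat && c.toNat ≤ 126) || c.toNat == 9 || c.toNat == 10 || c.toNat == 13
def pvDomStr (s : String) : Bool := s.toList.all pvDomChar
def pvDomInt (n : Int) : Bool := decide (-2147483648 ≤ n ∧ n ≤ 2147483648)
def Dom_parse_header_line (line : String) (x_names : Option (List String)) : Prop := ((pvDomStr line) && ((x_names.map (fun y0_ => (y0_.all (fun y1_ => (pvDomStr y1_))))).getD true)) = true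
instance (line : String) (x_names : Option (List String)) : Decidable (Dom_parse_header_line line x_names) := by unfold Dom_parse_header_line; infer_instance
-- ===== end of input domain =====

-- B: one strip-and-count pass (counter dict) instead of A's two dedup scans, and a
-- scan-and-splice expansion instead of .index/del/insert; return value only, no mutation issue.

-- ===== PORT A =====

-- PARAMETER_NAMES (module constant, shared by both sources)
def pvPnames : List String := ["alpha", "h0", "q", "r_p", "theta_p"]

-- port of modify_list (pnames is always the default PARAMETER_NAMES at the call site);
-- f"{key}_{pname}" is ported as String append; del input_list[index] is eraseIdx (index in range)
def modify_list_port (input_list : List String) (key : String) : List String :=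
  if input_list.contains key = false then input_list
  else
    match PySem.List.index? input_list key with
    | none => input_list  -- unreachable: key ∈ input_list
    | some index =>
      let l := input_list.eraseIdx index
      (PySem.List.enumerate pvPnames).foldl
        (fun acc ip => PySem.List.insert acc ((index : Int) + ip.1) (key ++ "_" ++ ip.2)) l

-- port of 'i = 0; for j, col in enumerate(columns): if col == void_key: columns[j] = f"{void_key}_{i}"; i += 1'
-- (the mutation only touches the current position, so it is a map carrying the counter)
def voidInner (key : String) : List String → Int → List String
  | [], _ => []
  | c :: rest, i =>
    if c == key then (key ++ "_" ++ PySem.Int.toStr i) :: voidInner key rest (i + 1)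
    else c :: voidInner key rest i

def parse_header_line (line : String) (x_names : Option (List String)) : List String :=
  match PySem.List.pyGet? (((PySem.Str.split? line "columns=\"").getD [])) 1 with
  | none => []  -- Python raises IndexError here; excluded by Pre_
  | some seg =>
    let payload := (PySem.List.pyGet? (((PySem.Str.split? seg "\"").getD [])) 0).getD ""  -- [0] never raises
    let columns := (((PySem.Str.split? payload ", ").getD [])).map PySem.Str.strip
    let columns := voidInner "void" columns 0
    let columns := voidInner "0" columns 0
    match x_names with
    | none => columns
    | some xs => xs.foldl modify_list_port columns

-- ===== PORT B =====

-- one pass: strip each raw column and rename 'void'/'0' occurrences using a counter dict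
def dedupPass : List String → PySem.Dict String Int → List String
  | [], _ => []
  | raw :: rest, counts =>
    let col := PySem.Str.strip raw
    if col == "void" || col == "0" then
      (col ++ "_" ++ PySem.Int.toStr (counts.getD col 0)) ::
        dedupPass rest (counts.insert col (counts.getD col 0 + 1))
    else
      col :: dedupPass rest counts

-- port of the scan-for-first-occurrence-and-splice loop of Source B
def expandFirst : List String → String → List String
  | [], _ => []
  | col :: rest, key =>
    if col == key then (pvPnames.map (fun p => key ++ "_" ++ p)) ++ rest
    else col :: expandFirst rest key

def parse_header_line_alt (line : String) (x_names : Option (List String)) : List String :=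
  match PySem.List.pyGet? (((PySem.Str.split? line "columns=\"").getD [])) 1 with
  | none => []
  | some seg =>
    let payload := (PySem.List.pyGet? (((PySem.Str.split? seg "\"").getD [])) 0).getD ""
    let columns := dedupPass (((PySem.Str.split? payload ", ").getD [])) PySem.Dict.empty
    match x_names with
    | none => columns
    | some xs => xs.foldl expandFirst columns

-- ===== PRECONDITION & SPEC =====
-- Pre_ excludes exactly the lines without the substring 'columns="', on which A raises IndexError.
def Pre_parse_header_line (line : String) (x_names : Option (List String)) : Prop :=
  PySem.Str.isIn "columns=\"" line = true
instance (line : String) (x_names : Option (List String)) : Decidable (Pre_parse_header_line line x_names) := by unfold Pre_parse_header_line; infer_instance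

def pvWitness_parse_header_line : String × Option (List String) :=
  ("columns=\"a, void, x, void, 0\"", some ["x"])

def Spec_parse_header_line (line : String) (x_names : Option (List String)) (out : List String) : Prop := out = parse_header_line_alt line x_names
instance (line : String) (x_names : Option (List String)) (out : List String) : Decidable (Spec_parse_header_line line x_names out) := by unfold Spec_parse_header_line; infer_instance

-- ===== CLAIM (what is proved, stated in full; the proofs are below) =====
def Claim_equal_parse_header_line : Prop := ∀ (line : String) (x_names : Option (List String)), Dom_parse_header_line line x_names → Pre_parse_header_line line x_names → Spec_parse_header_line line x_names (parse_header_line line x_names)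

-- ===== LEMMAS AND PROOFS =====

lemma void_suffix_ne (a b : String) (n : Int) (c c' : Char) (cs cs' : List Char)
    (ha : a.toList = c :: cs) (hb : b.toList = c' :: cs') (hcc : c ≠ c') :
    ((a ++ "_" ++ PySem.Int.toStr n) == b) = false := by
  rw [beq_eq_false_iff_ne]
  intro h
  have h2 := congrArg String.toList h
  rw [String.toList_append, String.toList_append, ha, hb] at h2
  simp only [List.cons_append, List.cons.injEq] at h2
  exact hcc h2.1

lemma voidInner_cons_eq (key : String) (rest : List String) (i : Int) :
    voidInner key (key :: rest) i = (key ++ "_" ++ PySem.Int.toStr i) :: voidInner key rest (i + 1) := by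
  simp [voidInner]

lemma voidInner_cons_ne (key c : String) (rest : List String) (i : Int) (h : (c == key) = false) :
    voidInner key (c :: rest) i = c :: voidInner key rest i := by
  simp [voidInner, h]

lemma dedupPass_eq : ∀ (cs : List String) (counts : PySem.Dict String Int),
    dedupPass cs counts =
      voidInner "0" (voidInner "void" (cs.map PySem.Str.strip) (counts.getD "void" 0))
        (counts.getD "0" 0)
  | [], counts => rfl
  | raw :: rest, counts => by
    simp only [dedupPass, List.map_cons]
    by_cases hv : PySem.Str.strip raw = "void"
    · rw [hv]
      simp only [beq_self_eq_true, Bool.true_or, if_true]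
      rw [voidInner_cons_eq "void",
        voidInner_cons_ne "0" _ _ _
          (void_suffix_ne "void" "0" _ 'v' '0' ['o', 'i', 'd'] [] rfl rfl (by decide)),
        dedupPass_eq rest, PySem.Dict.getD_insert_self,
        PySem.Dict.getD_insert_of_ne counts _ _ (by decide : ("0" : String) ≠ "void")]
    · by_cases h0 : PySem.Str.strip raw = "0"
      · rw [h0]
        simp only [beq_self_eq_true, Bool.or_true, if_true]
        rw [voidInner_cons_ne "void" "0" _ _ (by decide), voidInner_cons_eq "0",
          dedupPass_eq rest, PySem.Dict.getD_insert_self,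
          PySem.Dict.getD_insert_of_ne counts _ _ (by decide : ("void" : String) ≠ "0")]
      · rw [voidInner_cons_ne "void" _ _ _ (beq_eq_false_iff_ne.mpr hv),
          voidInner_cons_ne "0" _ _ _ (beq_eq_false_iff_ne.mpr h0)]
        simp only [beq_eq_false_iff_ne.mpr hv, beq_eq_false_iff_ne.mpr h0, Bool.or_self,
          Bool.false_eq_true, if_false]
        rw [dedupPass_eq rest]

lemma expandFirst_of_not_mem : ∀ (l : List String) (key : String), key ∉ l →
    expandFirst l key = l
  | [], _, _ => rfl
  | col :: rest, key, h => by
    have hck : col ≠ key := by rintro rfl; exact h List.mem_cons_self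
    simp only [expandFirst, beq_eq_false_iff_ne.mpr hck, Bool.false_eq_true, if_false]
    rw [expandFirst_of_not_mem rest key (fun hm => h (List.mem_cons_of_mem _ hm))]

lemma foldl_insert_enum (key : String) (k : Nat) :
    ∀ (ps : List String) (s : Nat) (pre suf : List String), k + s = pre.length →
      (PySem.List.enumerate ps (s : Int)).foldl
        (fun acc ip => PySem.List.insert acc ((k : Int) + ip.1) (key ++ "_" ++ ip.2)) (pre ++ suf)
      = pre ++ ps.map (fun p => key ++ "_" ++ p) ++ suf
  | [], s, pre, suf, h => by simp [PySem.List.enumerate_nil]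
  | p :: ps, s, pre, suf, h => by
    rw [PySem.List.enumerate_cons, List.foldl_cons]
    have hle : k + s ≤ (pre ++ suf).length := by simp only [List.length_append]; omega
    have hcast : (k : Int) + (((s : Int), p)).1 = ((k + s : Nat) : Int) := by push_cast; ring
    rw [hcast, PySem.List.insert_natCast _ _ _ hle, List.take_left' h.symm, List.drop_left' h.symm]
    have h2 : k + (s + 1) = (pre ++ [key ++ "_" ++ (((s : Int), p)).2]).length := by
      simp only [List.length_append, List.length_cons, List.length_nil]; omega
    have ih := foldl_insert_enum key k ps (s + 1) (pre ++ [key ++ "_" ++ (((s : Int), p)).2]) suf h2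
    simpa using ih

lemma eraseIdx_append_cons : ∀ (pre : List String) (x : String) (suf : List String),
    (pre ++ x :: suf).eraseIdx pre.length = pre ++ suf
  | [], _, _ => rfl
  | a :: pre, x, suf => by
    simp only [List.cons_append, List.length_cons, List.eraseIdx_cons_succ]
    rw [eraseIdx_append_cons pre x suf]

lemma expandFirst_splice : ∀ (key : String) (pre suf : List String), key ∉ pre →
    expandFirst (pre ++ key :: suf) key = pre ++ pvPnames.map (fun p => key ++ "_" ++ p) ++ suf
  | key, [], suf, _ => by simp [expandFirst]
  | key, a :: pre, suf, h => by
    have hak : a ≠ key := by rintro rfl; exact h List.mem_cons_self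
    simp only [List.cons_append, expandFirst, beq_eq_false_iff_ne.mpr hak,
      Bool.false_eq_true, if_false]
    rw [expandFirst_splice key pre suf (fun hm => h (List.mem_cons_of_mem _ hm))]

lemma modify_eq_expand (l : List String) (key : String) :
    modify_list_port l key = expandFirst l key := by
  by_cases hm : key ∈ l
  · obtain ⟨k, hk⟩ := Option.isSome_iff_exists.mp ((PySem.List.index?_isSome_iff _ _).mpr hm)
    obtain ⟨pre, suf, hl, hlen, hnp⟩ := (PySem.List.index?_eq_some_iff _ _ _).mp hk
    simp only [modify_list_port]
    rw [if_neg (by simp [List.contains_eq_mem, hm])]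
    simp only [hk]
    subst hl
    rw [expandFirst_splice key pre suf hnp, ← hlen, eraseIdx_append_cons]
    have hf := foldl_insert_enum key pre.length pvPnames 0 pre suf (by omega)
    simpa using hf
  · rw [expandFirst_of_not_mem l key hm]
    simp [modify_list_port, List.contains_eq_mem, hm]

-- ===== VERDICT (by name: the statement is the Claim_ definition above) =====
theorem parse_header_line_spec : Claim_equal_parse_header_line := by
  intro line x_names _ _
  unfold Spec_parse_header_line parse_header_line parse_header_line_alt
  cases PySem.List.pyGet? (((PySem.Str.split? line "columns=\"").getD [])) 1 with
  | none => rfl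
  | some seg =>
    simp only
    rw [dedupPass_eq]
    simp only [PySem.Dict.getD_empty]
    cases x_names with
    | none => rfl
    | some xs =>
      simp only
      congr 1
      funext l k
      exact modify_eq_expand l k
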